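-- pv_equiv track=rewrite | github.com/stanislavBozhanov/HackBulgaria | Programming101/week0/python_harder_problem_set/fibonacci_lists/fibonacci_lists.py | nth_fib_lists
-- ===== SOURCE A (Python) =====
-- def nth_fib_lists(listA, listB, n):
--     if n == 1:
--         return listA
--     elif n == 2:
--         return listB
--     elif n < 1:
--         return []
--     else:
--         for i in range(n - 2):
--             temp = listA + listB
--             listA = listB
--             listB = temp
--         return listB
-- ===== SOURCE B (Python) =====
-- def nth_fib_lists(listA, listB, n):
--     if n == 1:
--         return listA
--     elif n == 2:
--         return listB
--     elif n < 1:
--         return []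
--     else:
--         return nth_fib_lists(listB, listA + listB, n - 1)
-- ===== Notes on version B (the rewrite author's own statement) =====
-- stated objective: simpler
-- what changed: Replaced the range-loop that slides a (listA, listB) window via a temp variable with a direct tail recursion on n that advances the pair (A,B)->(B,A+B); no loop counter, no temp, no rebinding.
import Mathlib
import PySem

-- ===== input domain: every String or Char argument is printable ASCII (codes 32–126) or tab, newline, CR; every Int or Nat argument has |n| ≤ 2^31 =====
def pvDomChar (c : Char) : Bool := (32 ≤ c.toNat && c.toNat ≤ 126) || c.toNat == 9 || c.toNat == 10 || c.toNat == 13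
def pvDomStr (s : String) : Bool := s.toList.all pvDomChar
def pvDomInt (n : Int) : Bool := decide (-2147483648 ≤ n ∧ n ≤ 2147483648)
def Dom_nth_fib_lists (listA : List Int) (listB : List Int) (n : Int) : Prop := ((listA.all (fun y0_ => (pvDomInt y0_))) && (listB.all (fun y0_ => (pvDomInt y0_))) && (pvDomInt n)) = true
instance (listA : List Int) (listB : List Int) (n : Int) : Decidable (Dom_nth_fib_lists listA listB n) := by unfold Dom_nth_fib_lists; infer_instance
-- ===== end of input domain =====

-- B replaces A's sliding-window loop (temp/rebinding over range(n-2)) with a direct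
-- tail recursion on n advancing the pair (A,B) -> (B, A+B); same return value, simpler.

-- ===== PORT A =====
def nth_fib_lists (listA : List Int) (listB : List Int) (n : Int) : List Int :=
  if n = 1 then listA
  else if n = 2 then listB
  else if n < 1 then []
  else
    ((PySem.List.pyRange 0 (n - 2) 1).foldl
      (fun (p : List Int × List Int) _ => (p.2, p.1 ++ p.2)) (listA, listB)).2

-- ===== PORT B =====
def nth_fib_lists_alt (listA : List Int) (listB : List Int) (n : Int) : List Int :=
  if n = 1 then listA
  else if n = 2 then listB
  else if n < 1 then []
  else nth_fib_lists_alt listB (listA ++ listB) (n - 1)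
termination_by n.toNat
decreasing_by
  omega

-- ===== PRECONDITION & SPEC =====
def Spec_nth_fib_lists (listA : List Int) (listB : List Int) (n : Int) (out : List Int) : Prop := out = nth_fib_lists_alt listA listB n
instance (listA : List Int) (listB : List Int) (n : Int) (out : List Int) : Decidable (Spec_nth_fib_lists listA listB n out) := by unfold Spec_nth_fib_lists; infer_instance

-- ===== CLAIM (what is proved, stated in full; the proofs are below) =====
def Claim_equal_nth_fib_lists : Prop := ∀ (listA : List Int) (listB : List Int) (n : Int), Dom_nth_fib_lists listA listB n → Spec_nth_fib_lists listA listB n (nth_fib_lists listA listB n)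

-- ===== LEMMAS AND PROOFS =====

-- the fold's step ignores the element, so the result depends only on the list's length;
-- it equals B's recursion at n = length + 2
theorem fold_eq_alt (l : List Int) : ∀ (a b : List Int),
    ((l.foldl (fun (p : List Int × List Int) _ => (p.2, p.1 ++ p.2)) (a, b)).2)
      = nth_fib_lists_alt a b ((l.length : Int) + 2) := by
  induction l with
  | nil =>
    intro a b
    rw [nth_fib_lists_alt]
    simp
  | cons x t ih =>
    intro a b
    simp only [List.foldl_cons, ih]
    conv_rhs => rw [nth_fib_lists_alt]
    have h1 : ¬ ((t.length : Int) + 1 + 2 = 1) := by omega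
    have h2 : ¬ ((t.length : Int) + 1 + 2 = 2) := by omega
    have h3 : ¬ ((t.length : Int) + 1 + 2 < 1) := by omega
    simp only [List.length_cons, Nat.cast_add, Nat.cast_one, h1, h2, h3, if_false]
    norm_num
    congr 1
    omega

-- ===== VERDICT (by name: the statement is the Claim_ definition above) =====
theorem nth_fib_lists_spec : Claim_equal_nth_fib_lists := by
  intro a b n _
  unfold Spec_nth_fib_lists nth_fib_lists
  by_cases h1 : n = 1
  · simp [h1, nth_fib_lists_alt]
  by_cases h2 : n = 2
  · simp [h2, nth_fib_lists_alt]
  by_cases h3 : n < 1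
  · rw [nth_fib_lists_alt]
    simp [h1, h2, h3]
  simp only [h1, h2, h3, if_false]
  rw [fold_eq_alt]
  have hlen : ((PySem.List.pyRange 0 (n - 2) 1).length : Int) + 2 = n := by
    rw [PySem.List.length_pyRange_one]
    omega
  rw [hlen]
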